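-- pv_equiv track=rewrite | github.com/yuzeng2333/pono | scripts/analyze_temporal_patterns.py | detect_triggered
-- ===== SOURCE A (Python) =====
-- from itertools import combinations
--
-- def detect_triggered(pred_waveforms):
--     """Find predicates where B changes only after A changes.
--     Returns list of (trigger_pred, dependent_pred).
--     """
--     names = list(pred_waveforms.keys())
--     results = []
--     for a, b in combinations(names, 2):
--         wa = pred_waveforms[a]
--         wb = pred_waveforms[b]
--         n = min(len(wa), len(wb))
--         if n < 3:
--             continue
--
--         # check if B's first transition happens after A's first transition
--         a_first = None
--         b_first = None
--         for i in range(1, n):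
--             if a_first is None and wa[i] != wa[i - 1] and wa[i] is not None:
--                 a_first = i
--             if b_first is None and wb[i] != wb[i - 1] and wb[i] is not None:
--                 b_first = i
--
--         if a_first is not None and b_first is not None:
--             if a_first < b_first:
--                 results.append((a, b, a_first, b_first))
--             elif b_first < a_first:
--                 results.append((b, a, b_first, a_first))
--
--     return results
-- ===== SOURCE B (Python) =====
-- def detect_triggered(pred_waveforms):
--     """Find predicates where B changes only after A changes.
--     Returns list of (trigger_pred, dependent_pred).
--     """
--     # Precompute, once per predicate, its length and the index of its first
--     # transition over the FULL waveform; per pair only truncate by min-length.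
--     info = {}
--     for name, w in pred_waveforms.items():
--         f = None
--         for i in range(1, len(w)):
--             if w[i] != w[i - 1] and w[i] is not None:
--                 f = i
--                 break
--         info[name] = (len(w), f)
--
--     results = []
--     rest = list(pred_waveforms.keys())
--     while rest:
--         a = rest[0]
--         rest = rest[1:]
--         la, fa = info[a]
--         for b in rest:
--             lb, fb = info[b]
--             n = min(la, lb)
--             if n < 3:
--                 continue
--             a_first = fa if fa is not None and fa < n else None
--             b_first = fb if fb is not None and fb < n else None
--             if a_first is not None and b_first is not None:
--                 if a_first < b_first:
--                     results.append((a, b, a_first, b_first))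
--                 elif b_first < a_first:
--                     results.append((b, a, b_first, a_first))
--     return results
-- ===== Notes on version B (the rewrite author's own statement) =====
-- stated objective: faster
-- what changed: B computes each predicate's length and first-transition index once in a single pass per waveform, then each pair only truncates those cached indices by the min-length threshold, instead of A's re-scan of both waveforms for every pair.
import Mathlib
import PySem

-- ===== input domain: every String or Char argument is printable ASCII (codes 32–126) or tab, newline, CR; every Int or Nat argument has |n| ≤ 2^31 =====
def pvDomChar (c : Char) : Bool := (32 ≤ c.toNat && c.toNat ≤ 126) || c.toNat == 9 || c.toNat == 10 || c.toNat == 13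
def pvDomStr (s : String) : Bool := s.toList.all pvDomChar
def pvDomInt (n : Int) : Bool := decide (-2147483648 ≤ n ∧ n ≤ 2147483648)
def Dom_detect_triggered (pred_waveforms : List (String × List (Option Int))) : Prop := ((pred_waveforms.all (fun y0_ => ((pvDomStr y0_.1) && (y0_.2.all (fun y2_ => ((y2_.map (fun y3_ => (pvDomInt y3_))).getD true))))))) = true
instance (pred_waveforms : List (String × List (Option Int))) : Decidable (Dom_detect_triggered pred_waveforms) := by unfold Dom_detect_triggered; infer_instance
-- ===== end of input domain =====

-- B precomputes each predicate's first transition index once and truncates per pair (faster: O(P*L + P^2) vs A's O(P^2*L)).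

-- ===== PORT A =====
-- A's transition test 'w[i] != w[i-1] and w[i] is not None'
def tcondA (w : List (Option Int)) (i : Int) : Bool :=
  PySem.List.pyGetD w i none != PySem.List.pyGetD w (i - 1) none
    && (PySem.List.pyGetD w i none).isSome

-- itertools.combinations(names, 2)
def combos2 : List String → List (String × String)
  | [] => []
  | x :: rest => rest.map (fun y => (x, y)) ++ combos2 rest

-- A's inner 'for i in range(1, n)' loop tracking (a_first, b_first)
def aScan (wa wb : List (Option Int)) (n : Int) : Option Int × Option Int :=
  (PySem.List.pyRange 1 n 1).foldl
    (fun st i =>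
      let af := if st.1 = none ∧ tcondA wa i = true then some i else st.1
      let bf := if st.2 = none ∧ tcondA wb i = true then some i else st.2
      (af, bf))
    (none, none)

-- the body of A's 'for a, b in combinations(names, 2)' loop
def aStep (d : PySem.Dict String (List (Option Int)))
    (results : List (String × String × Int × Int)) (p : String × String) :
    List (String × String × Int × Int) :=
  let wa := d.getD p.1 []
  let wb := d.getD p.2 []
  let n := min (PySem.List.len wa) (PySem.List.len wb)
  if n < 3 then results
  else
    match aScan wa wb n with
    | (some a_first, some b_first) =>
        if a_first < b_first then results ++ [(p.1, p.2, a_first, b_first)]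
        else if b_first < a_first then results ++ [(p.2, p.1, b_first, a_first)]
        else results
    | _ => results

def detect_triggered (pred_waveforms : List (String × List (Option Int))) : List (String × String × Int × Int) :=
  let d := PySem.Dict.ofList pred_waveforms
  let names := d.keys
  (combos2 names).foldl (aStep d) []

-- ===== PORT B =====
-- B's transition test 'w[i] != w[i-1] and w[i] is not None'
def tcondB (w : List (Option Int)) (i : Int) : Bool :=
  PySem.List.pyGetD w i none != PySem.List.pyGetD w (i - 1) none
    && (PySem.List.pyGetD w i none).isSome

-- Source B's per-predicate scan: first i in range(1, len w) with a transition (break = find?)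
def firstTrans (w : List (Option Int)) : Option Int :=
  (PySem.List.pyRange 1 (PySem.List.len w) 1).find? (fun i => tcondB w i)

-- the per-pair body of Source B's inner 'for b in rest' loop
def bStep (info : PySem.Dict String (Int × Option Int)) (results : List (String × String × Int × Int))
    (a b : String) : List (String × String × Int × Int) :=
  let la_fa := info.getD a (0, none)
  let lb_fb := info.getD b (0, none)
  let n := min la_fa.1 lb_fb.1
  if n < 3 then results
  else
    let a_first := match la_fa.2 with | some i => if i < n then some i else none | none => none
    let b_first := match lb_fb.2 with | some i => if i < n then some i else none | none => none
    match a_first, b_first with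
    | some af, some bf =>
        if af < bf then results ++ [(a, b, af, bf)]
        else if bf < af then results ++ [(b, a, bf, af)]
        else results
    | _, _ => results

-- Source B's 'while rest: a = rest[0]; rest = rest[1:]; for b in rest: …'
def bPairLoop (info : PySem.Dict String (Int × Option Int)) :
    List String → List (String × String × Int × Int) → List (String × String × Int × Int)
  | [], results => results
  | a :: rest, results => bPairLoop info rest (rest.foldl (fun r b => bStep info r a b) results)

-- Source B's info loop: cache (len(w), first transition) per predicate
def buildInfo (d : PySem.Dict String (List (Option Int))) : PySem.Dict String (Int × Option Int) :=
  d.keys.foldl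
    (fun (f : PySem.Dict String (Int × Option Int)) name =>
      let w := d.getD name []
      f.insert name (PySem.List.len w, firstTrans w))
    PySem.Dict.empty

def detect_triggered_alt (pred_waveforms : List (String × List (Option Int))) : List (String × String × Int × Int) :=
  let d := PySem.Dict.ofList pred_waveforms
  let info := buildInfo d
  bPairLoop info d.keys []

-- ===== PRECONDITION & SPEC =====
def Spec_detect_triggered (pred_waveforms : List (String × List (Option Int))) (out : List (String × String × Int × Int)) : Prop := out = detect_triggered_alt pred_waveforms
instance (pred_waveforms : List (String × List (Option Int))) (out : List (String × String × Int × Int)) : Decidable (Spec_detect_triggered pred_waveforms out) := by unfold Spec_detect_triggered; infer_instance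

-- ===== CLAIM (what is proved, stated in full; the proofs are below) =====
def Claim_equal_detect_triggered : Prop := ∀ (pred_waveforms : List (String × List (Option Int))), Dom_detect_triggered pred_waveforms → Spec_detect_triggered pred_waveforms (detect_triggered pred_waveforms)

-- ===== LEMMAS AND PROOFS =====

-- the two ports spell the identical Python test the same way
theorem tcond_eq : tcondA = tcondB := rfl

-- a fold that never overwrites a set state keeps it
theorem foldl_first_some (P : Int → Bool) (l : List Int) (j : Int) :
    l.foldl (fun st i => if st = none ∧ P i = true then some i else st) (some j) = some j := by
  induction l with
  | nil => rfl
  | cons x xs ih => simp [ih]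

-- A's self-keeping fold computes the first hit, i.e. find?
theorem foldl_first_none (P : Int → Bool) (l : List Int) :
    l.foldl (fun st i => if st = none ∧ P i = true then some i else st) none = l.find? P := by
  induction l with
  | nil => rfl
  | cons x xs ih =>
    by_cases h : P x
    · simp [h, foldl_first_some]
    · simp [h, ih]

-- the aScan pair-state fold splits into two independent find?s
theorem aScan_eq (wa wb : List (Option Int)) (n : Int) :
    aScan wa wb n = ((PySem.List.pyRange 1 n 1).find? (fun i => tcondA wa i),
                     (PySem.List.pyRange 1 n 1).find? (fun i => tcondA wb i)) := by
  unfold aScan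
  rw [PySem.List.foldl_prod_mk
        (f := fun st i => if st = none ∧ tcondA wa i = true then some i else st)
        (g := fun st i => if st = none ∧ tcondA wb i = true then some i else st)]
  rw [foldl_first_none, foldl_first_none]

-- truncating the full-waveform first transition at n is the first transition below n
theorem find?_trunc (w : List (Option Int)) (n : Int) (hn : 1 ≤ n) (hle : n ≤ PySem.List.len w) :
    (PySem.List.pyRange 1 n 1).find? (fun i => tcondB w i)
      = match firstTrans w with
        | some i => if i < n then some i else none
        | none => none := by
  unfold firstTrans
  rw [PySem.List.pyRange_one_append 1 n (PySem.List.len w) hn hle, List.find?_append]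
  rcases hpre : (PySem.List.pyRange 1 n 1).find? (fun i => tcondB w i) with _ | i
  · rcases hsuf : (PySem.List.pyRange n (PySem.List.len w) 1).find? (fun i => tcondB w i) with _ | i
    · simp
    · have hm := List.mem_of_find?_eq_some hsuf
      rw [PySem.List.mem_pyRange_one] at hm
      simp only [Option.none_or]
      have : ¬ i < n := by omega
      simp [this]
  · have hm := List.mem_of_find?_eq_some hpre
    rw [PySem.List.mem_pyRange_one] at hm
    have : i < n := hm.2
    simp [this]

-- the info dict caches exactly (len, firstTrans) for known names and the default otherwise
theorem getD_foldl_insert_fresh (l : List String) (val : String → Int × Option Int)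
    (hnd : l.Nodup) (a : String) :
    (l.foldl (fun (f : PySem.Dict String (Int × Option Int)) name => f.insert name (val name))
        PySem.Dict.empty).getD a (0, none)
      = if a ∈ l then val a else (0, none) := by
  induction l using List.reverseRecOn with
  | nil => simp [PySem.Dict.getD_empty]
  | append_singleton xs x ih =>
    rw [List.foldl_append]
    simp only [List.foldl_cons, List.foldl_nil]
    rw [PySem.Dict.getD_insert]
    rcases List.nodup_append.mp hnd with ⟨h1, -, -⟩
    by_cases hax : a = x
    · simp [hax]
    · rw [ih h1]
      by_cases hm : a ∈ xs <;> simp [hax, hm]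

-- per-pair agreement, for arbitrary names (unknown names have length 0 and both sides skip)
theorem step_eq (d : PySem.Dict String (List (Option Int))) (hnd : d.keys.Nodup)
    (r : List (String × String × Int × Int)) (a b : String) :
    aStep d r (a, b) = bStep (buildInfo d) r a b := by
  have hbi : buildInfo d = d.keys.foldl
      (fun (f : PySem.Dict String (Int × Option Int)) name =>
        f.insert name (PySem.List.len (d.getD name []), firstTrans (d.getD name [])))
      PySem.Dict.empty := rfl
  have hdef : ∀ c : String, c ∉ d.keys → d.getD c [] = [] := by
    intro c hc
    have hcont : d.contains c = false := by
      rw [PySem.Dict.contains_eq_decide_mem_keys]; simpa using hc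
    exact PySem.Dict.getD_of_not_contains d [] hcont
  unfold aStep bStep
  rw [hbi, getD_foldl_insert_fresh d.keys _ hnd a, getD_foldl_insert_fresh d.keys _ hnd b]
  by_cases ha : a ∈ d.keys
  · by_cases hb : b ∈ d.keys
    · rw [if_pos ha, if_pos hb]
      dsimp only
      by_cases h3 : min (PySem.List.len (d.getD a [])) (PySem.List.len (d.getD b [])) < 3
      · rw [if_pos h3, if_pos h3]
      · rw [if_neg h3, if_neg h3]
        have hna : min (PySem.List.len (d.getD a [])) (PySem.List.len (d.getD b []))
            ≤ PySem.List.len (d.getD a []) := min_le_left _ _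
        have hnb : min (PySem.List.len (d.getD a [])) (PySem.List.len (d.getD b []))
            ≤ PySem.List.len (d.getD b []) := min_le_right _ _
        rw [aScan_eq, tcond_eq, find?_trunc _ _ (by omega) hna, find?_trunc _ _ (by omega) hnb]
        cases hfa : firstTrans (d.getD a []) <;> cases hfb : firstTrans (d.getD b []) <;>
          dsimp only <;> split_ifs <;> rfl
    · rw [if_pos ha, if_neg hb]
      dsimp only
      rw [hdef b hb]
      simp only [PySem.List.len_eq, List.length_nil, Nat.cast_zero]
      have h3 : min ((d.getD a []).length : Int) 0 < 3 := by omega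
      rw [if_pos h3, if_pos h3]
  · rw [if_neg ha]
    dsimp only
    rw [hdef a ha]
    simp only [PySem.List.len_eq, List.length_nil, Nat.cast_zero]
    by_cases hb : b ∈ d.keys
    · rw [if_pos hb]
      dsimp only
      have h3 : min (0 : Int) ((d.getD b []).length : Int) < 3 := by omega
      rw [if_pos h3, if_pos h3]
    · rw [if_neg hb]
      dsimp only
      have h3a : min (0 : Int) ((d.getD b []).length : Int) < 3 := by omega
      have h3b : min (0 : Int) (0 : Int) < 3 := by norm_num
      rw [if_pos h3a, if_pos h3b]

-- Source B's head/rest loop enumerates exactly combinations(names, 2)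
theorem pairLoop_eq (info : PySem.Dict String (Int × Option Int))
    (g : List (String × String × Int × Int) → String × String → List (String × String × Int × Int))
    (hg : ∀ r a b, g r (a, b) = bStep info r a b)
    (names : List String) (acc : List (String × String × Int × Int)) :
    (combos2 names).foldl g acc = bPairLoop info names acc := by
  induction names generalizing acc with
  | nil => rfl
  | cons a rest ih =>
    rw [combos2, List.foldl_append, List.foldl_map, bPairLoop, ih]
    congr 1
    exact PySem.List.foldl_congr_mem rest _ _ acc (fun acc' x _ => hg acc' a x)

-- ===== VERDICT (by name: the statement is the Claim_ definition above) =====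
theorem detect_triggered_spec : Claim_equal_detect_triggered := by
  intro pw _
  unfold Spec_detect_triggered detect_triggered detect_triggered_alt
  show List.foldl (aStep (PySem.Dict.ofList pw)) [] (combos2 (PySem.Dict.ofList pw).keys)
      = bPairLoop (buildInfo (PySem.Dict.ofList pw)) (PySem.Dict.ofList pw).keys []
  exact (pairLoop_eq (buildInfo (PySem.Dict.ofList pw)) (aStep (PySem.Dict.ofList pw))
    (fun r a b => step_eq (PySem.Dict.ofList pw) (PySem.Dict.nodup_keys_ofList pw) r a b)
    (PySem.Dict.ofList pw).keys [])
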